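-- pv_equiv track=rewrite | github.com/aka-dave/aka-dave.github.io | Python Projects/ValidSubString.py | solution
-- ===== SOURCE A (Python) =====
-- import string
--
-- def solution(s):
--
--
--
--     vn = []
--     sng = []
--     word = ""
--     count = []
--     index = 0
--     switch = False
--
--     l = list(string.ascii_lowercase)
--     u = list(string.ascii_uppercase)
--     n = [i for i in range(10)]
--
--     if len(s) > 200 or len(s) < 1:
--         return -1
--     for ch in s:
--         if ch not in l and ch not in u:
--             try:
--                 test = int(ch)
--             except ValueError:
--                 return -1
--
--
--         if ch in l or ch in u:
--             sng.append(ch)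
--         else:
--             sng.append(int(ch))
--
--
--     end = len(sng)
--
--     if all([type(num) == int for num in sng]):  # takes into account getting all numbers
--         return -1
--     elif any([type(num) == int for num in sng]):  # if you get at least 1 number
--         for i, c in enumerate(sng):
--             if type(c) == int and i == 0:  # base condition for integer
--                 count.append(i)
--                 index += 1
--                 continue
--             if type(c) != int and i == 0:        # base condition for string
--                 word = word + c
--                 switch = True
--                 continue
--             if type(c) != int:
--                 word = word + c
--
--             if type(c) == int and switch:  # first iteration with a number
--                 count.append(i)
--                 index += 1
--                 vn.append(word)
--                 word = ""
--                 switch = False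
--                 if i < end - 1:
--                     continue
--                 else:
--                     break
--
--
--             if type(c) == int:
--                 count.append(i)
--                 index += 1
--
--             if type(c) == int and (count[-1] - count[-2]) > 1:   # condition for the wall
--                 vn.append(word)
--                 word = ""
--             if type(c) != int and i == end -1:   # end conditions
--                 vn.append(word)
--         vl = list(filter(lambda a: any([up.isupper() for up in a]), vn))
--         return len(sorted(vl, key=len, reverse=True)[0]) if vl != [] else -1
--
--     else:
--         for q in sng:
--             if q.isupper():
--                 return len(sng)
--         return -1
-- ===== SOURCE B (Python) =====
-- def solution(s):
--     if len(s) > 200 or len(s) < 1: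
--         return -1
--     best = -1
--     cur = 0
--     up = False
--     for ch in s:
--         if 'a' <= ch <= 'z' or 'A' <= ch <= 'Z':
--             cur += 1
--             up = up or ch.isupper()
--         elif '0' <= ch <= '9':
--             if up and cur > best:
--                 best = cur
--             cur = 0
--             up = False
--         else:
--             return -1
--     if up and cur > best:
--         best = cur
--     return best
-- ===== Notes on version B (the rewrite author's own statement) =====
-- stated objective: simpler
-- what changed: Replaced A's two-pass design (build a mixed char/int list, then a count/switch/wall state machine collecting letter runs into a list that is filtered and sorted) by one single pass that keeps only three scalars (best length so far, current run length, current run has an uppercase) and never materialises runs, indices or sorts.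
import Mathlib
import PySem

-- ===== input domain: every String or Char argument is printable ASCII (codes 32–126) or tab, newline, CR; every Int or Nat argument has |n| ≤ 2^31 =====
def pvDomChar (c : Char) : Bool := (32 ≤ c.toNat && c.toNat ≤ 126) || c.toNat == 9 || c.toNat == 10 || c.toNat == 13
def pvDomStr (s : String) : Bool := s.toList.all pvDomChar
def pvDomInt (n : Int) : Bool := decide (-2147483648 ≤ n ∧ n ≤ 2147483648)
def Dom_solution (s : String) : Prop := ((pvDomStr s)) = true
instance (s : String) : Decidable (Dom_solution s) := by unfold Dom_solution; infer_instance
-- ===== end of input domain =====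

-- B replaces A's two-pass list-building + count/switch/wall state machine (ending in a
-- filter and a sort of the collected letter runs) by a single scan keeping three scalars:
-- objective 'simpler', same return value on every input in Dom.

-- ===== PORT A =====
-- l = list(string.ascii_lowercase), u = list(string.ascii_uppercase)
def asciiLower : List Char := ['a','b','c','d','e','f','g','h','i','j','k','l','m','n','o','p','q','r','s','t','u','v','w','x','y','z']
def asciiUpper : List Char := ['A','B','C','D','E','F','G','H','I','J','K','L','M','N','O','P','Q','R','S','T','U','V','W','X','Y','Z']

-- sng holds a mix of Python str (letters) and int (digits)
inductive PyItem where
  | int : Int → PyItem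
  | str : Char → PyItem
deriving DecidableEq, Repr

def PyItem.isInt : PyItem → Bool
  | .int _ => true
  | .str _ => false

-- the first loop of A: validation (try: int(ch) / except: return -1 = none) and building sng
def buildSng : List Char → Option (List PyItem)
  | [] => some []
  | ch :: t =>
    if !asciiLower.contains ch && !asciiUpper.contains ch then
      match PySem.Int.ofChars? [ch] with
      | none => none                                   -- ValueError: return -1
      | some v => (buildSng t).map (fun r => PyItem.int v :: r)
    else
      (buildSng t).map (fun r => PyItem.str ch :: r)

structure AState where
  vn : List (List Char)
  word : List Char
  count : List Int
  index : Int
  switch : Bool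
deriving DecidableEq, Repr

-- (count[-1] - count[-2]) > 1; an out-of-range index (Python IndexError) yields false here,
-- but it is unreachable: count has ≥ 2 entries whenever A evaluates this test
def wallTest (count : List Int) : Bool :=
  match PySem.List.pyGet? count (-1), PySem.List.pyGet? count (-2) with
  | some a, some b => decide (a - b > 1)
  | _, _ => false

-- the main loop 'for i, c in enumerate(sng)' of A's middle branch
def machine (end_ : Nat) : Nat → List PyItem → AState → AState
  | _, [], st => st
  | i, c :: rest, st =>
    match c with
    | PyItem.int _ =>
      if i = 0 then
        machine end_ (i+1) rest { st with count := st.count ++ [(i : Int)], index := st.index + 1 }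
      else if st.switch then
        let st' : AState :=
          { st with count := st.count ++ [(i : Int)], index := st.index + 1,
                    vn := st.vn ++ [st.word], word := [], switch := false }
        if i < end_ - 1 then machine end_ (i+1) rest st' else st'   -- continue / break
      else
        let st' : AState := { st with count := st.count ++ [(i : Int)], index := st.index + 1 }
        let st'' : AState := if wallTest st'.count then { st' with vn := st'.vn ++ [st'.word], word := [] } else st'
        machine end_ (i+1) rest st''
    | PyItem.str ch =>
      if i = 0 then
        machine end_ (i+1) rest { st with word := st.word ++ [ch], switch := true }
      else
        let st' : AState := { st with word := st.word ++ [ch] }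
        let st'' : AState := if i = end_ - 1 then { st' with vn := st'.vn ++ [st'.word] } else st'
        machine end_ (i+1) rest st''

-- vl = filter(any isupper, vn); len(sorted(vl, key=len, reverse=True)[0]) if vl != [] else -1
def finalize (st : AState) : Int :=
  let vl := st.vn.filter (fun a => a.any (fun up => PySem.Chars.isupper up))
  if vl ≠ [] then
    match PySem.List.sorted vl (fun a => a.length) true with
    | w :: _ => (w.length : Int)
    | [] => -1                                          -- unreachable: vl ≠ []
  else -1

-- the final 'for q in sng: if q.isupper(): return len(sng)' loop (runs only when sng has no ints)
def lastLoop (n : Int) : List PyItem → Int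
  | [] => -1
  | q :: t =>
    match q with
    | PyItem.str c => if PySem.Chars.isupper c then n else lastLoop n t
    | PyItem.int _ => lastLoop n t                      -- unreachable: branch runs only without ints

def solution (s : String) : Int :=
  if s.toList.length > 200 ∨ s.toList.length < 1 then -1
  else
    match buildSng s.toList with
    | none => -1
    | some sng =>
      if sng.all (fun num => num.isInt) then -1
      else if sng.any (fun num => num.isInt) then
        finalize (machine sng.length 0 sng ⟨[], [], [], 0, false⟩)
      else lastLoop (sng.length : Int) sng

-- ===== PORT B =====
-- one pass: best = longest uppercase-containing run seen, cur = current run length, up = run has uppercase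
def goFind : List Char → Int → Int → Bool → Int
  | [], best, cur, up => if up && decide (cur > best) then cur else best
  | ch :: t, best, cur, up =>
    if ('a' ≤ ch && ch ≤ 'z') || ('A' ≤ ch && ch ≤ 'Z') then
      goFind t best (cur + 1) (up || PySem.Chars.isupper ch)
    else if '0' ≤ ch && ch ≤ '9' then
      goFind t (if up && decide (cur > best) then cur else best) 0 false
    else -1

def solution_alt (s : String) : Int :=
  if s.toList.length > 200 ∨ s.toList.length < 1 then -1
  else goFind s.toList (-1) 0 false

-- ===== PRECONDITION & SPEC =====
def Spec_solution (s : String) (out : Int) : Prop := out = solution_alt s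
instance (s : String) (out : Int) : Decidable (Spec_solution s out) := by unfold Spec_solution; infer_instance

-- ===== CLAIM (what is proved, stated in full; the proofs are below) =====
def Claim_equal_solution : Prop := ∀ (s : String), Dom_solution s → Spec_solution s (solution s)

-- ===== LEMMAS AND PROOFS =====

-- proof-side abbreviations
def isL (c : Char) : Bool := ('a' ≤ c && c ≤ 'z') || ('A' ≤ c && c ≤ 'Z')
def isD (c : Char) : Bool := '0' ≤ c && c ≤ '9'
def itemOf (c : Char) : PyItem := if isL c then PyItem.str c else PyItem.int ((PySem.Int.ofChars? [c]).getD 0)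
def trailRun (p : List Char) : List Char := (p.reverse.takeWhile isL).reverse
def dIdx : Nat → List Char → List Int
  | _, [] => []
  | i, c :: t => if isL c then dIdx (i+1) t else (i : Int) :: dIdx (i+1) t
def upW (w : List Char) : Bool := w.any (fun c => PySem.Chars.isupper c)
def maxU (vn : List (List Char)) : Int :=
  vn.foldl (fun b w => if upW w && decide ((w.length : Int) > b) then (w.length : Int) else b) (-1)

-- finite check over the ASCII+control codes of Dom
theorem charFin (c : Char) (h : pvDomChar c = true)
    (f g : Char → Bool) (hall : ∀ n < 127, f (Char.ofNat n) = g (Char.ofNat n)) : f c = g c := by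
  have h1 : c.toNat < 127 := by
    simp [pvDomChar, Bool.or_eq_true, Bool.and_eq_true] at h
    omega
  have h2 : Char.ofNat c.toNat = c := Char.ofNat_toNat c
  simpa [h2] using hall c.toNat h1

theorem digitTest (c : Char) (h : pvDomChar c = true) :
    (PySem.Int.ofChars? [c]).isSome = isD c := by
  exact charFin c h (fun c => (PySem.Int.ofChars? [c]).isSome) (fun c => isD c) (by decide)

theorem letterTest (c : Char) (h : pvDomChar c = true) :
    (!asciiLower.contains c && !asciiUpper.contains c) = !isL c := by
  exact charFin c h (fun c => !asciiLower.contains c && !asciiUpper.contains c)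
    (fun c => !isL c) (by decide)

theorem goFind_cons (ch : Char) (t : List Char) (best cur : Int) (up : Bool) :
    goFind (ch :: t) best cur up =
      if isL ch then goFind t best (cur + 1) (up || PySem.Chars.isupper ch)
      else if isD ch then goFind t (if up && decide (cur > best) then cur else best) 0 false
      else -1 := rfl

theorem buildSng_some (cs : List Char) : ∀ (sng : List PyItem),
    (∀ c ∈ cs, pvDomChar c = true) → buildSng cs = some sng →
    sng = cs.map itemOf ∧ ∀ c ∈ cs, isL c = true ∨ isD c = true := by
  induction cs with
  | nil =>
    intro sng _ h
    simp [buildSng] at h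
    simp [h.symm]
  | cons ch t ih =>
    intro sng hdom h
    have hd := hdom ch (by simp)
    have hlet := letterTest ch hd
    have hdig := digitTest ch hd
    simp only [buildSng] at h
    rw [hlet] at h
    by_cases hL : isL ch = true
    · rw [if_neg (by simp [hL])] at h
      cases hb : buildSng t with
      | none => rw [hb] at h; simp at h
      | some r =>
        rw [hb] at h
        simp only [Option.map_some, Option.some.injEq] at h
        obtain ⟨h1, h2⟩ := ih r (fun c hc => hdom c (by simp [hc])) hb
        subst h
        refine ⟨by simp [itemOf, hL, h1], ?_⟩
        intro c hc
        rcases List.mem_cons.mp hc with h | h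
        · subst h; exact Or.inl hL
        · exact h2 c h
    · rw [if_pos (by simp [hL])] at h
      cases hoc : PySem.Int.ofChars? [ch] with
      | none => rw [hoc] at h; simp at h
      | some v =>
        rw [hoc] at h
        have hD : isD ch = true := by rw [← hdig, hoc]; rfl
        cases hb : buildSng t with
        | none => rw [hb] at h; simp at h
        | some r =>
          rw [hb] at h
          simp only [Option.map_some, Option.some.injEq] at h
          obtain ⟨h1, h2⟩ := ih r (fun c hc => hdom c (by simp [hc])) hb
          subst h
          refine ⟨by simp [itemOf, hL, h1, hoc], ?_⟩
          intro c hc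
          rcases List.mem_cons.mp hc with h | h
          · subst h; exact Or.inr hD
          · exact h2 c h

theorem buildSng_none (cs : List Char) :
    (∀ c ∈ cs, pvDomChar c = true) → buildSng cs = none →
    ∀ best cur up, goFind cs best cur up = -1 := by
  induction cs with
  | nil => intro _ h; simp [buildSng] at h
  | cons ch t ih =>
    intro hdom h best cur up
    have hd := hdom ch (by simp)
    have hlet := letterTest ch hd
    have hdig := digitTest ch hd
    simp only [buildSng] at h
    rw [hlet] at h
    by_cases hL : isL ch = true
    · rw [if_neg (by simp [hL])] at h
      cases hb : buildSng t with
      | none =>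
        rw [goFind_cons, if_pos hL]
        exact ih (fun c hc => hdom c (by simp [hc])) hb _ _ _
      | some r => rw [hb] at h; simp at h
    · rw [if_pos (by simp [hL])] at h
      cases hoc : PySem.Int.ofChars? [ch] with
      | none =>
        have hD : isD ch = false := by rw [← hdig, hoc]; rfl
        rw [goFind_cons, if_neg (by simp [hL]), if_neg (by simp [hD])]
      | some v =>
        rw [hoc] at h
        have hD : isD ch = true := by rw [← hdig, hoc]; rfl
        cases hb : buildSng t with
        | none =>
          rw [goFind_cons, if_neg (by simp [hL]), if_pos hD]
          exact ih (fun c hc => hdom c (by simp [hc])) hb _ _ _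
        | some r => rw [hb] at h; simp at h

def muStep (b : Int) (w : List Char) : Int :=
  if upW w && decide ((w.length : Int) > b) then (w.length : Int) else b

theorem maxU_eq_foldl (vn : List (List Char)) : maxU vn = vn.foldl muStep (-1) := rfl

theorem foldl_muStep_of_no_up (vn : List (List Char)) :
    (∀ w ∈ vn, upW w = false) → ∀ b, vn.foldl muStep b = b := by
  induction vn with
  | nil => intro _ b; rfl
  | cons w t ih =>
    intro h b
    have hw := h w (by simp)
    simp only [List.foldl_cons]
    rw [show muStep b w = b by simp [muStep, hw]]
    exact ih (fun x hx => h x (by simp [hx])) b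

theorem le_muStep (b : Int) (w : List Char) : b ≤ muStep b w := by
  simp only [muStep]
  split_ifs with h
  · simp only [Bool.and_eq_true, decide_eq_true_eq] at h
    omega
  · exact le_refl b

theorem foldl_muStep_ge (vn : List (List Char)) : ∀ b : Int,
    b ≤ vn.foldl muStep b ∧ ∀ w ∈ vn, upW w = true → ((w.length : Int)) ≤ vn.foldl muStep b := by
  induction vn with
  | nil => intro b; exact ⟨le_refl b, by simp⟩
  | cons w t ih =>
    intro b
    simp only [List.foldl_cons]
    obtain ⟨ih1, ih2⟩ := ih (muStep b w)
    refine ⟨le_trans (le_muStep b w) ih1, ?_⟩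
    intro x hx hup
    rcases List.mem_cons.mp hx with h | h
    · subst h
      refine le_trans ?_ ih1
      simp only [muStep, hup, Bool.true_and]
      split_ifs with hgt
      · exact le_refl _
      · simpa using hgt
    · exact ih2 x h hup

theorem foldl_muStep_mem (vn : List (List Char)) : ∀ b : Int,
    vn.foldl muStep b = b ∨ ∃ w ∈ vn, upW w = true ∧ vn.foldl muStep b = (w.length : Int) := by
  induction vn with
  | nil => intro b; exact Or.inl rfl
  | cons w t ih =>
    intro b
    simp only [List.foldl_cons]
    rcases ih (muStep b w) with h | ⟨x, hx, hup, hlen⟩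
    · rw [h]
      by_cases hs : (upW w && decide ((w.length : Int) > b)) = true
      · refine Or.inr ⟨w, by simp, ?_, ?_⟩
        · have := hs; simp only [Bool.and_eq_true] at this; exact this.1
        · simp [muStep, hs]
      · left; simp [muStep, hs]
    · exact Or.inr ⟨x, by simp [hx], hup, hlen⟩

theorem finalize_eq (st : AState) : finalize st = maxU st.vn := by
  unfold finalize
  by_cases hvl : st.vn.filter (fun a => a.any (fun up => PySem.Chars.isupper up)) = []
  · rw [if_neg (by simp [hvl])]
    rw [maxU_eq_foldl]
    rw [foldl_muStep_of_no_up]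
    intro w hw
    by_contra hc
    have : w ∈ st.vn.filter (fun a => a.any (fun up => PySem.Chars.isupper up)) := by
      rw [List.mem_filter]
      exact ⟨hw, by simpa [upW] using hc⟩
    rw [hvl] at this
    simp at this
  · rw [if_pos (by simpa using hvl)]
    cases hs : PySem.List.sorted (st.vn.filter (fun a => a.any (fun up => PySem.Chars.isupper up))) (fun a => a.length) true with
    | nil => exact absurd ((PySem.List.sorted_eq_nil_iff _ _ _).mp hs) hvl
    | cons hd tl =>
      have hmem : hd ∈ st.vn.filter (fun a => a.any (fun up => PySem.Chars.isupper up)) := by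
        have := PySem.List.mem_sorted (st.vn.filter (fun a => a.any (fun up => PySem.Chars.isupper up)))
          (fun a => a.length) true hd
        rw [hs] at this
        exact this.mp (by simp)
      have hge := PySem.List.key_head_sorted_rev_ge _ _ hs
      obtain ⟨hmemvn, hup⟩ := List.mem_filter.mp hmem
      have hup' : upW hd = true := by simpa [upW] using hup
      have h1 : ((hd.length : Int)) ≤ maxU st.vn := by
        rw [maxU_eq_foldl]
        exact (foldl_muStep_ge st.vn (-1)).2 hd hmemvn hup'
      have h2 : maxU st.vn ≤ ((hd.length : Int)) := by
        rw [maxU_eq_foldl]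
        rcases foldl_muStep_mem st.vn (-1) with h | ⟨x, hx, hxu, hxl⟩
        · rw [h]; omega
        · rw [hxl]
          have hxvl : x ∈ st.vn.filter (fun a => a.any (fun up => PySem.Chars.isupper up)) := by
            rw [List.mem_filter]
            exact ⟨hx, by simpa [upW] using hxu⟩
          exact_mod_cast hge x hxvl
      show ((hd.length : Int)) = maxU st.vn
      omega

theorem maxU_step (vn : List (List Char)) (w : List Char) :
    maxU (vn ++ [w]) = if upW w && decide (((w.length : Int)) > maxU vn) then (w.length : Int) else maxU vn := by
  simp [maxU, List.foldl_append]

theorem trailRun_append (p : List Char) (c : Char) :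
    trailRun (p ++ [c]) = if isL c then trailRun p ++ [c] else [] := by
  by_cases h : isL c <;> simp [trailRun, h]

theorem dIdx_append (p : List Char) (c : Char) : ∀ k,
    dIdx k (p ++ [c]) = dIdx k p ++ (if isL c then [] else [((k + p.length : Nat) : Int)]) := by
  induction p with
  | nil => intro k; by_cases h : isL c <;> simp [dIdx, h]
  | cons a t ih =>
    intro k
    by_cases h : isL a <;> simp [dIdx, h, ih (k+1)] <;> ring_nf

theorem dIdx_last (p : List Char) (h : ¬ (p.all isL = true)) :
    ∃ (ys : List Int) (j : Nat), dIdx 0 p = ys ++ [(j : Int)] ∧ j + (trailRun p).length + 1 = p.length := by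
  induction p using List.reverseRecOn with
  | nil => simp at h
  | append_singleton q c ihq =>
    by_cases hC : isL c = true
    · have hq : ¬ (q.all isL = true) := by
        intro hall
        exact h (by simp [List.all_append, hall, hC])
      obtain ⟨ys, j, h1, h2⟩ := ihq hq
      refine ⟨ys, j, ?_, ?_⟩
      · rw [dIdx_append q c 0, if_pos hC, h1, List.append_nil]
      · rw [trailRun_append q c, if_pos hC]
        simp
        omega
    · refine ⟨dIdx 0 q, q.length, ?_, ?_⟩
      · rw [dIdx_append q c 0, if_neg hC]
        simp
      · rw [trailRun_append q c, if_neg hC]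
        simp

theorem pyGet?_pair (ys : List Int) (a b : Int) :
    PySem.List.pyGet? (ys ++ [a, b]) (-2) = some a := by
  rw [PySem.List.pyGet?_neg_ofNat (ys ++ [a, b]) 2 (by omega) (by simp)]
  rw [show (ys ++ [a, b]).length - 2 = ys.length by simp]
  rw [List.getElem?_append_right (le_refl ys.length)]
  simp

theorem machine_eq (end_ : Nat) (r : List Char) : ∀ (p : List Char) (st : AState) (best cur : Int) (up : Bool),
    r ≠ [] → p ≠ [] →
    end_ = p.length + r.length →
    (∀ c ∈ r, isL c = true ∨ isD c = true) →
    st.word = trailRun p →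
    st.switch = p.all isL →
    st.count = dIdx 0 p →
    best = maxU st.vn →
    cur = ((trailRun p).length : Int) →
    up = upW (trailRun p) →
    finalize (machine end_ p.length (r.map itemOf) st) = goFind r best cur up := by
  induction r with
  | nil => intro p st best cur up hr; exact absurd rfl hr
  | cons c r' ih =>
    intro p st best cur up _ hp hend hall hw hsw hc hbest hcur hup
    obtain ⟨vn, word, count, index, switch⟩ := st
    dsimp only at hw hsw hc hbest
    subst hw hsw hc hbest hcur hup
    have hi0 : p.length ≠ 0 := by simpa using hp
    have hallc := hall c (by simp)
    by_cases hL : isL c = true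
    · -- current char is a letter
      have hitem : itemOf c = PyItem.str c := by simp [itemOf, hL]
      rw [List.map_cons, hitem, goFind_cons, if_pos hL]
      have hupw : upW (trailRun p ++ [c]) = (upW (trailRun p) || PySem.Chars.isupper c) := by
        simp [upW]
      by_cases hr' : r' = []
      · subst hr'
        have hEnd : p.length = end_ - 1 := by simp at hend; omega
        simp only [machine, if_neg hi0, List.map_nil, if_pos hEnd]
        rw [finalize_eq]
        dsimp only
        rw [maxU_step]
        simp only [goFind, hupw]
        have hlen2 : (((trailRun p ++ [c]).length : Nat) : Int) = ((trailRun p).length : Int) + 1 := by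
          simp
        rw [hlen2]
      · have hEnd : ¬ (p.length = end_ - 1) := by
          cases r' with
          | nil => exact absurd rfl hr'
          | cons d t => simp at hend; omega
        simp only [machine, if_neg hi0, if_neg hEnd]
        have hmain := ih (p ++ [c]) ⟨vn, trailRun p ++ [c], dIdx 0 p, index, p.all isL⟩
          (maxU vn) (((trailRun p).length : Int) + 1) (upW (trailRun p) || PySem.Chars.isupper c)
          hr' (by simp) (by simp at hend ⊢; omega) (fun x hx => hall x (by simp [hx]))
          (by dsimp only; rw [trailRun_append, if_pos hL])
          (by dsimp only; rw [List.all_append]; simp [hL])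
          (by dsimp only; rw [dIdx_append, if_pos hL, List.append_nil])
          (by dsimp only)
          (by rw [trailRun_append, if_pos hL]; simp)
          (by rw [trailRun_append, if_pos hL, hupw])
        simpa using hmain
    · -- current char is a digit
      have hD : isD c = true := hallc.resolve_left hL
      have hitem : itemOf c = PyItem.int ((PySem.Int.ofChars? [c]).getD 0) := by simp [itemOf, hL]
      rw [List.map_cons, hitem, goFind_cons, if_neg (by simp [hL]), if_pos hD]
      by_cases hsw : p.all isL = true
      · -- switch is on: first number after the leading word
        rw [hsw]
        simp only [machine, if_neg hi0]
        by_cases hr' : r' = []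
        · subst hr'
          have hEnd : ¬ (p.length < end_ - 1) := by simp at hend; omega
          simp only [List.map_nil, if_neg hEnd]
          rw [finalize_eq]
          simp [goFind, maxU_step]
        · have hEnd : p.length < end_ - 1 := by
            cases r' with
            | nil => exact absurd rfl hr'
            | cons d t => simp at hend; omega
          simp only [if_pos hEnd]
          have hmain := ih (p ++ [c]) ⟨vn ++ [trailRun p], [], dIdx 0 p ++ [(p.length : Int)], index + 1, false⟩
            (maxU (vn ++ [trailRun p])) 0 false
            hr' (by simp) (by simp at hend ⊢; omega) (fun x hx => hall x (by simp [hx]))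
            (by dsimp only; rw [trailRun_append, if_neg (by simp [hL])])
            (by dsimp only; rw [List.all_append]; simp [hL])
            (by dsimp only; rw [dIdx_append, if_neg (by simp [hL])]; simp)
            rfl
            (by rw [trailRun_append, if_neg (by simp [hL])]; simp)
            (by rw [trailRun_append, if_neg (by simp [hL])]; simp [upW])
          rw [maxU_step] at hmain
          simpa using hmain
      · -- switch is off
        rw [show (p.all isL) = false by simpa using hsw]
        simp only [machine, if_neg hi0, Bool.false_eq_true, if_neg (show ¬ False by simp)]
        -- the wall test
        obtain ⟨ys, j, hdx, hjl⟩ := dIdx_last p (by simpa using hsw)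
        have hwall : wallTest (dIdx 0 p ++ [(p.length : Int)]) =
            decide ((trailRun p).length > 0) := by
          rw [hdx]
          have hassoc : (ys ++ [(j : Int)]) ++ [(p.length : Int)] = ys ++ [(j : Int), (p.length : Int)] := by
            simp
          unfold wallTest
          rw [hassoc, pyGet?_pair]
          rw [show ys ++ [(j : Int), (p.length : Int)] = (ys ++ [(j : Int)]) ++ [(p.length : Int)] by simp,
            PySem.List.pyGet?_neg_one_append_singleton]
          simp only [decide_eq_decide]
          omega
        rw [hwall]
        by_cases htr : trailRun p = []
        · rw [if_neg (by simp [htr])]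
          by_cases hr' : r' = []
          · subst hr'
            simp only [List.map_nil, machine]
            rw [finalize_eq]
            simp [goFind, htr, upW]
          · have hmain := ih (p ++ [c]) ⟨vn, trailRun p, dIdx 0 p ++ [(p.length : Int)], index + 1, false⟩
              (maxU vn) 0 false
              hr' (by simp) (by simp at hend ⊢; omega) (fun x hx => hall x (by simp [hx]))
              (by dsimp only; rw [trailRun_append, if_neg (by simp [hL]), htr])
              (by dsimp only; rw [List.all_append]; simp [hL])
              (by dsimp only; rw [dIdx_append, if_neg (by simp [hL])]; simp)
              rfl
              (by rw [trailRun_append, if_neg (by simp [hL])]; simp)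
              (by rw [trailRun_append, if_neg (by simp [hL])]; simp [upW])
            simpa [htr, upW] using hmain
        · rw [if_pos (by simp [htr, List.length_pos_iff])]
          by_cases hr' : r' = []
          · subst hr'
            simp only [List.map_nil, machine]
            rw [finalize_eq]
            simp [goFind, maxU_step]
          · have hmain := ih (p ++ [c]) ⟨vn ++ [trailRun p], [], dIdx 0 p ++ [(p.length : Int)], index + 1, false⟩
              (maxU (vn ++ [trailRun p])) 0 false
              hr' (by simp) (by simp at hend ⊢; omega) (fun x hx => hall x (by simp [hx]))
              (by dsimp only; rw [trailRun_append, if_neg (by simp [hL])])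
              (by dsimp only; rw [List.all_append]; simp [hL])
              (by dsimp only; rw [dIdx_append, if_neg (by simp [hL])]; simp)
              rfl
              (by rw [trailRun_append, if_neg (by simp [hL])]; simp)
              (by rw [trailRun_append, if_neg (by simp [hL])]; simp [upW])
            rw [maxU_step] at hmain
            simpa using hmain
    

theorem goFind_allDigits (cs : List Char) (h : ∀ c ∈ cs, isL c = false ∧ isD c = true) :
    ∀ best, goFind cs best 0 false = best := by
  induction cs with
  | nil => intro best; simp [goFind]
  | cons c t ih =>
    intro best
    obtain ⟨h1, h2⟩ := h c (by simp)
    rw [goFind_cons, if_neg (by simp [h1]), if_pos h2]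
    simpa using ih (fun c hc => h c (by simp [hc])) best

theorem goFind_allLetters (cs : List Char) (h : ∀ c ∈ cs, isL c = true) :
    ∀ best cur up, goFind cs best cur up =
      if (up || cs.any (fun c => PySem.Chars.isupper c)) && decide (cur + (cs.length : Int) > best) then cur + (cs.length : Int) else best := by
  induction cs with
  | nil => intro best cur up; simp [goFind]
  | cons c t ih =>
    intro best cur up
    rw [goFind_cons, if_pos (h c (by simp))]
    rw [ih (fun c hc => h c (by simp [hc]))]
    have : cur + 1 + (t.length : Int) = cur + ((t.length : Nat) + 1 : Nat) := by push_cast; ring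
    simp [List.any_cons, Bool.or_assoc, this]

theorem lastLoop_eq (cs : List Char) (h : ∀ c ∈ cs, isL c = true) (n : Int) :
    lastLoop n (cs.map itemOf) = if cs.any (fun c => PySem.Chars.isupper c) then n else -1 := by
  induction cs with
  | nil => simp [lastLoop]
  | cons c t ih =>
    have hc := h c (by simp)
    by_cases hu : PySem.Chars.isupper c = true <;>
      simp [itemOf, hc, lastLoop, hu, ih (fun c hc => h c (by simp [hc]))]

theorem allConv (cs : List Char) :
    ((cs.map itemOf).all (fun num => num.isInt)) = cs.all (fun c => !isL c) := by
  rw [List.all_map]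
  congr 1
  funext c
  by_cases h : isL c <;> simp [itemOf, h, PyItem.isInt, Function.comp]

theorem anyConv (cs : List Char) :
    ((cs.map itemOf).any (fun num => num.isInt)) = cs.any (fun c => !isL c) := by
  rw [List.any_map]
  congr 1
  funext c
  by_cases h : isL c <;> simp [itemOf, h, PyItem.isInt, Function.comp]

-- ===== VERDICT (by name: the statement is the Claim_ definition above) =====
theorem solution_spec : Claim_equal_solution := by
  unfold Claim_equal_solution Spec_solution
  intro s hdom
  have hdom' : ∀ c ∈ s.toList, pvDomChar c = true := by
    simpa [Dom_solution, pvDomStr, List.all_eq_true] using hdom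
  unfold solution solution_alt
  generalize hg : s.toList = cs at hdom' ⊢
  by_cases hlen : cs.length > 200 ∨ cs.length < 1
  · rw [if_pos hlen, if_pos hlen]
  · rw [if_neg hlen, if_neg hlen]
    cases hB : buildSng cs with
    | none =>
      rw [buildSng_none cs hdom' hB]
    | some sng =>
      obtain ⟨hmap, hval⟩ := buildSng_some cs sng hdom' hB
      subst hmap
      dsimp only
      by_cases hAll : cs.all (fun c => !isL c) = true
      · rw [if_pos (by rw [allConv]; exact hAll)]
        have hdig : ∀ c ∈ cs, isL c = false ∧ isD c = true := by
          intro c hc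
          have h1 : isL c = false := by simpa using (List.all_eq_true.mp hAll) c hc
          exact ⟨h1, (hval c hc).resolve_left (by simp [h1])⟩
        rw [goFind_allDigits cs hdig (-1)]
      · rw [if_neg (by rw [allConv]; exact hAll)]
        by_cases hAny : cs.any (fun c => !isL c) = true
        · rw [if_pos (by rw [anyConv]; exact hAny)]
          have hne : cs ≠ [] := by
            intro h0
            exact hlen (Or.inr (by simp [h0]))
          obtain ⟨c, t, hcs⟩ : ∃ c t, cs = c :: t := by
            cases cs with
            | nil => exact absurd rfl hne
            | cons a b => exact ⟨a, b, rfl⟩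
          subst hcs
          cases t with
          | nil =>
            exfalso
            simp at hAll hAny
            simp [hAny] at hAll
          | cons c2 t2 =>
            by_cases hc1 : isL c = true
            · rw [List.map_cons, show itemOf c = PyItem.str c by simp [itemOf, hc1]]
              simp only [machine, if_true]
              rw [goFind_cons, if_pos hc1]
              have hmain := machine_eq ((PyItem.str c :: List.map itemOf (c2 :: t2)).length) (c2 :: t2) [c]
                ⟨[], [] ++ [c], [], 0, true⟩ (-1) (0 + 1) (false || PySem.Chars.isupper c)
                (by simp) (by simp) (by simp; omega)
                (fun x hx => hval x (by simp [hx]))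
                (by dsimp only; simp [trailRun, hc1])
                (by simp [hc1])
                (by simp [dIdx, hc1])
                rfl
                (by simp [trailRun, hc1])
                (by simp [trailRun, upW, hc1])
              simpa using hmain
            · have hD : isD c = true := (hval c (by simp)).resolve_left hc1
              rw [List.map_cons, show itemOf c = PyItem.int ((PySem.Int.ofChars? [c]).getD 0) by simp [itemOf, hc1]]
              simp only [machine, if_true, Bool.false_eq_true, if_false]
              rw [goFind_cons, if_neg hc1, if_pos hD]
              have hmain := machine_eq ((PyItem.int ((PySem.Int.ofChars? [c]).getD 0) :: List.map itemOf (c2 :: t2)).length) (c2 :: t2) [c]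
                ⟨[], [], [] ++ [(0 : Int)], 0 + 1, false⟩ (-1) 0 false
                (by simp) (by simp) (by simp; omega)
                (fun x hx => hval x (by simp [hx]))
                (by dsimp only; simp [trailRun, hc1])
                (by simp [hc1])
                (by simp [dIdx, hc1])
                rfl
                (by simp [trailRun, hc1])
                (by simp [trailRun, upW, hc1])
              simpa using hmain
        · rw [if_neg (by rw [anyConv]; exact hAny)]
          have hlet : ∀ c ∈ cs, isL c = true := by
            intro c hc
            by_contra hcl
            exact hAny (List.any_eq_true.mpr ⟨c, hc, by simpa using hcl⟩)
          rw [show ((List.map itemOf cs).length : Int) = (cs.length : Int) by simp]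
          rw [lastLoop_eq cs hlet]
          rw [goFind_allLetters cs hlet (-1) 0 false]
          by_cases hu : cs.any (fun c => PySem.Chars.isupper c) = true
          · rw [if_pos hu, if_pos (by simp [hu]; omega)]
            omega
          · rw [if_neg hu, if_neg (by simp [hu])]
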